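-- pv_equiv track=rewrite | github.com/Shbc314159/Genetic-algorithm-ai | Cube.py | vertices_minmax
-- ===== SOURCE A (Python) =====
-- def vertices_minmax(vertices):
--     results = []
--     for i in range(0, 3):
--         column_values = [row[i] for row in vertices]
--         smallest_value = min(column_values)
--         largest_value = max(column_values)
--         results.append(smallest_value)
--         results.append(largest_value)
--
--     return results
-- ===== SOURCE B (Python) =====
-- def vertices_minmax(vertices):
--     row = vertices[0]
--     min0 = max0 = row[0]
--     min1 = max1 = row[1]
--     min2 = max2 = row[2]
--     for row in vertices[1:]:
--         min0 = min(min0, row[0]); max0 = max(max0, row[0])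
--         min1 = min(min1, row[1]); max1 = max(max1, row[1])
--         min2 = min(min2, row[2]); max2 = max(max2, row[2])
--     return [min0, max0, min1, max1, min2, max2]
-- ===== Notes on version B (the rewrite author's own statement) =====
-- stated objective: alternative
-- what changed: Replaces three per-column list comprehensions each followed by min() and max() with one single pass over the vertex list maintaining six running min/max accumulators initialised from the first row.
import Mathlib
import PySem

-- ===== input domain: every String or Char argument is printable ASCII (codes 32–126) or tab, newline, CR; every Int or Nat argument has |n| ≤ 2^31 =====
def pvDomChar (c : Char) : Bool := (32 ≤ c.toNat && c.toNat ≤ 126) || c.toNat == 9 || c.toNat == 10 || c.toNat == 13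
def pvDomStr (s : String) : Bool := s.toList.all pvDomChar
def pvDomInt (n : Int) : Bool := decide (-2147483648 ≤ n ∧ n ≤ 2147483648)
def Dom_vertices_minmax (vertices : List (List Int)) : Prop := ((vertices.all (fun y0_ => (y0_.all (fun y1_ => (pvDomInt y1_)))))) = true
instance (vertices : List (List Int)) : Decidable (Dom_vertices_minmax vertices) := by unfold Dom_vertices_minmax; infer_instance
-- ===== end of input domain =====

-- B replaces A's three column comprehensions + min()/max() with one pass keeping six running accumulators (alternative decomposition, same cost).

-- ===== PORT A =====
-- row[i] with rows known ≥ 3 long under Pre_; .getD 0 is unreachable there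
def pvGet (row : List Int) (i : Int) : Int := (PySem.List.pyGet? row i).getD 0

def vertices_minmax (vertices : List (List Int)) : List Int :=
  (PySem.List.pyRange 0 3 1).foldl (fun results i =>
    let column_values := vertices.map (fun row => pvGet row i)
    let smallest_value := (PySem.List.min? column_values (fun y => y)).getD 0
    let largest_value := (PySem.List.max? column_values (fun y => y)).getD 0
    results ++ [smallest_value, largest_value]) []

-- ===== PORT B =====
def vertices_minmax_alt (vertices : List (List Int)) : List Int :=
  match vertices with
  | [] => []   -- unreachable under Pre_ (Python B raises IndexError on [])
  | row :: rest =>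
    let st := rest.foldl
      (fun (s : Int × Int × Int × Int × Int × Int) r =>
        (min s.1 (pvGet r 0), max s.2.1 (pvGet r 0),
         min s.2.2.1 (pvGet r 1), max s.2.2.2.1 (pvGet r 1),
         min s.2.2.2.2.1 (pvGet r 2), max s.2.2.2.2.2 (pvGet r 2)))
      (pvGet row 0, pvGet row 0, pvGet row 1, pvGet row 1, pvGet row 2, pvGet row 2)
    [st.1, st.2.1, st.2.2.1, st.2.2.2.1, st.2.2.2.2.1, st.2.2.2.2.2]

-- ===== PRECONDITION & SPEC =====
-- Pre_ excludes exactly the inputs where A raises: ValueError (min of empty column) on [],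
-- IndexError on any row with fewer than 3 coordinates.
def Pre_vertices_minmax (vertices : List (List Int)) : Prop :=
  vertices ≠ [] ∧ ∀ row ∈ vertices, 3 ≤ row.length
instance (vertices : List (List Int)) : Decidable (Pre_vertices_minmax vertices) := by
  unfold Pre_vertices_minmax; infer_instance

def pvWitness_vertices_minmax : List (List Int) := [[1, 2, 3], [4, 0, -1]]

def Spec_vertices_minmax (vertices : List (List Int)) (out : List Int) : Prop := out = vertices_minmax_alt vertices
instance (vertices : List (List Int)) (out : List Int) : Decidable (Spec_vertices_minmax vertices out) := by unfold Spec_vertices_minmax; infer_instance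

-- ===== CLAIM (what is proved, stated in full; the proofs are below) =====
def Claim_equal_vertices_minmax : Prop := ∀ (vertices : List (List Int)), Dom_vertices_minmax vertices → Pre_vertices_minmax vertices → Spec_vertices_minmax vertices (vertices_minmax vertices)

-- ===== LEMMAS AND PROOFS =====

-- B's 6-tuple fold computed componentwise
lemma tuple_fold (rest : List (List Int)) (a b c d e f : Int) :
    rest.foldl
      (fun (s : Int × Int × Int × Int × Int × Int) r =>
        (min s.1 (pvGet r 0), max s.2.1 (pvGet r 0),
         min s.2.2.1 (pvGet r 1), max s.2.2.2.1 (pvGet r 1),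
         min s.2.2.2.2.1 (pvGet r 2), max s.2.2.2.2.2 (pvGet r 2)))
      (a, b, c, d, e, f)
    = (rest.foldl (fun s r => min s (pvGet r 0)) a,
       rest.foldl (fun s r => max s (pvGet r 0)) b,
       rest.foldl (fun s r => min s (pvGet r 1)) c,
       rest.foldl (fun s r => max s (pvGet r 1)) d,
       rest.foldl (fun s r => min s (pvGet r 2)) e,
       rest.foldl (fun s r => max s (pvGet r 2)) f) := by
  induction rest generalizing a b c d e f with
  | nil => rfl
  | cons r t ih => simp [List.foldl_cons, ih]

-- ===== VERDICT (by name: the statement is the Claim_ definition above) =====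
theorem vertices_minmax_spec : Claim_equal_vertices_minmax := by
  intro vertices _ hpre
  obtain ⟨hne, _⟩ := hpre
  unfold Spec_vertices_minmax
  cases vertices with
  | nil => exact absurd rfl hne
  | cons row rest =>
    show vertices_minmax (row :: rest) = vertices_minmax_alt (row :: rest)
    unfold vertices_minmax vertices_minmax_alt
    have hr : PySem.List.pyRange 0 3 1 = [0, 1, 2] := by decide
    simp only [hr, List.foldl_cons, List.foldl_nil, List.map_cons,
      PySem.List.min?_id_cons, PySem.List.max?_id_cons, Option.getD_some,
      tuple_fold, List.foldl_map, List.nil_append]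
    simp
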